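-- pv_equiv track=rewrite | github.com/Julesc013/dominium | tests/invariant/failure_class_registry_tests.py | _collect_test_names
-- ===== SOURCE A (Python) =====
-- def _collect_test_names(text):
--     names = set()
--     marker = "dom_add_testx(NAME "
--     offset = 0
--     while True:
--         idx = text.find(marker, offset)
--         if idx < 0:
--             break
--         start = idx + len(marker)
--         end = text.find("\n", start)
--         if end < 0:
--             break
--         name = text[start:end].strip().split()[0]
--         if name:
--             names.add(name)
--         offset = end + 1
--     return names
-- ===== SOURCE B (Python) =====
-- def _collect_test_names(text):
--     names = set()
--     marker = "dom_add_testx(NAME "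
--     lines = text.split("\n")
--     for line in lines[:-1]:
--         idx = line.find(marker)
--         if idx >= 0:
--             name = line[idx + len(marker):].strip().split()[0]
--             if name:
--                 names.add(name)
--     return names
-- ===== Notes on version B (the rewrite author's own statement) =====
-- stated objective: idiomatic
-- what changed: Replaces the manual offset-chasing while-loop (find marker, find newline, jump past it) by a line-oriented pass: split on newline once, drop the final newline-less segment, and process the first marker of each remaining line independently.
import Mathlib
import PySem

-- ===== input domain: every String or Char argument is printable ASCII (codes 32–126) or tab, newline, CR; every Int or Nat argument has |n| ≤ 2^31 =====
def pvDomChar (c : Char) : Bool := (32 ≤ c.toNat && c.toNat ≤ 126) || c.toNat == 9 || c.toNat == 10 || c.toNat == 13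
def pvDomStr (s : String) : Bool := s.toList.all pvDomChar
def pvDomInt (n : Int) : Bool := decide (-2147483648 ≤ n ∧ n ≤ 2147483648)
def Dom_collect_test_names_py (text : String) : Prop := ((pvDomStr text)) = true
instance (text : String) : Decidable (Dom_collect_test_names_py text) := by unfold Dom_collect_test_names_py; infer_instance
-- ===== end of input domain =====

-- B replaces A's manual offset-chasing while-loop by an idiomatic split-on-newline pass
-- over all lines but the last; return value only (no argument is mutated).

-- marker string shared by both Pythons
def pvMarker : List Char := "dom_add_testx(NAME ".toList

-- ===== PORT A =====
-- while True: find marker from offset; find "\n" after it; take first word of the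
-- stripped segment; jump offset past the newline.  Fuel |text|+1 bounds the iteration
-- count (offset strictly grows each round).  Where the Python raises IndexError
-- (whitespace-only segment, excluded by Pre_) the port uses [] for split()[0].
def pvLoopA (cs : List Char) : Nat → Int → PySem.Set String → PySem.Set String
  | 0, _, names => names
  | fuel+1, offset, names =>
    let idx := PySem.Chars.findFrom cs pvMarker offset
    if idx < 0 then names
    else
      let start := idx + (pvMarker.length : Int)
      let end_ := PySem.Chars.findFrom cs ['\n'] start
      if end_ < 0 then names
      else
        let name := (PySem.Chars.split₀
          (PySem.Chars.strip (PySem.Chars.slice cs (some start) (some end_)))).headD []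
        pvLoopA cs fuel (end_ + 1)
          (if name ≠ [] then PySem.Set.add names (String.ofList name) else names)

def collect_test_names_py (text : String) : List String :=
  pvLoopA text.toList (text.toList.length + 1) 0 PySem.Set.empty

-- ===== PORT B =====
-- one line of Source B's loop body: first marker of the line, first word after it
def pvStepB (names : PySem.Set String) (line : List Char) : PySem.Set String :=
  let idx := PySem.Chars.find line pvMarker
  if 0 ≤ idx then
    let name := (PySem.Chars.split₀
      (PySem.Chars.strip (PySem.Chars.slice line (some (idx + (pvMarker.length : Int))) none))).headD []
    if name ≠ [] then PySem.Set.add names (String.ofList name) else names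
  else names

def collect_test_names_py_alt (text : String) : List String :=
  ((PySem.Chars.splitOn text.toList ['\n']).dropLast).foldl pvStepB PySem.Set.empty

-- ===== PRECONDITION & SPEC =====
-- Pre_ excludes exactly the inputs where the Python A raises IndexError (split()[0] of a
-- whitespace-only segment after a processed marker); B raises there too.
def Pre_collect_test_names_py (text : String) : Prop :=
  ∀ line ∈ (PySem.Chars.splitOn text.toList ['\n']).dropLast,
    0 ≤ PySem.Chars.find line ("dom_add_testx(NAME ".toList) →
      PySem.Chars.strip (PySem.Chars.slice line
        (some (PySem.Chars.find line ("dom_add_testx(NAME ".toList) + 19)) none) ≠ []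
instance (text : String) : Decidable (Pre_collect_test_names_py text) := by
  unfold Pre_collect_test_names_py; infer_instance

def pvWitness_collect_test_names_py : String := "dom_add_testx(NAME t\nx\n"

def Spec_collect_test_names_py (text : String) (out : List String) : Prop := out = collect_test_names_py_alt text
instance (text : String) (out : List String) : Decidable (Spec_collect_test_names_py text out) := by unfold Spec_collect_test_names_py; infer_instance

-- ===== CLAIM (what is proved, stated in full; the proofs are below) =====
def Claim_equal_collect_test_names_py : Prop := ∀ (text : String), Dom_collect_test_names_py text → Pre_collect_test_names_py text → Spec_collect_test_names_py text (collect_test_names_py text)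

-- ===== LEMMAS AND PROOFS =====

theorem pv_find_eq_of {s sub : List Char} {j : Nat} (h1 : sub <+: s.drop j)
    (h2 : ∀ i, i < j → ¬ sub <+: s.drop i) : PySem.Chars.find s sub = (j : Int) := by
  have hin : PySem.Chars.isIn sub s = true :=
    (PySem.Chars.exists_prefix_drop_iff_isIn sub s).1 ⟨j, h1⟩
  have hnn : 0 ≤ PySem.Chars.find s sub :=
    (PySem.Chars.find_nonneg_iff s sub).2 ((PySem.Chars.isIn_iff_infix sub s).1 hin)
  obtain ⟨hp, hmin⟩ := PySem.Chars.find_spec hnn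
  have h3 : ¬ (PySem.Chars.find s sub).toNat < j := fun hlt => h2 _ hlt hp
  have h4 : ¬ j < (PySem.Chars.find s sub).toNat := fun hlt => hmin j hlt h1
  omega

theorem pv_no_straddle {line rest : List Char} {i : Nat} (hi : i ≤ line.length)
    (h : pvMarker <+: (line ++ '\n'::rest).drop i) :
    i + pvMarker.length ≤ line.length ∧ pvMarker <+: line.drop i := by
  rw [List.drop_append_of_le_length hi] at h
  have hlen : pvMarker.length ≤ (line.drop i).length := by
    by_contra hlt
    rw [Nat.not_le] at hlt
    have htake := List.prefix_iff_eq_take.1 h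
    have hnl : '\n' ∈ pvMarker := by
      rw [htake, List.take_append]
      have h1 : pvMarker.length - (line.drop i).length ≠ 0 := by omega
      refine List.mem_append_right _ ?_
      obtain ⟨m, hm⟩ : ∃ m, pvMarker.length - (line.drop i).length = m + 1 :=
        ⟨_, (Nat.succ_pred_eq_of_ne_zero h1).symm⟩
      rw [hm, List.take_succ_cons]
      exact List.mem_cons_self
    exact absurd hnl (by decide)
  constructor
  · have := List.length_drop (l := line) (i := i); omega
  · rw [List.prefix_iff_eq_take] at h ⊢
    rwa [List.take_append_of_le_length hlen] at h

theorem pv_find_nl {u rest : List Char} (h : '\n' ∉ u) :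
    PySem.Chars.find (u ++ '\n'::rest) ['\n'] = (u.length : Int) := by
  apply pv_find_eq_of
  · rw [List.drop_left]
    exact ⟨rest, rfl⟩
  · intro i hlt hpre
    rw [List.drop_append_of_le_length (by omega)] at hpre
    have htake := List.prefix_iff_eq_take.1 hpre
    have hlen : 1 ≤ (u.drop i).length := by
      have := List.length_drop (l := u) (i := i); simp at htake ⊢; omega
    rw [List.take_append_of_le_length (by simpa using hlen)] at htake
    have : '\n' ∈ u := by
      have h1 : ['\n'] = List.take 1 (u.drop i) := by simpa using htake
      have : '\n' ∈ List.take 1 (u.drop i) := by rw [← h1]; exact List.mem_cons_self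
      exact List.mem_of_mem_drop (List.mem_of_mem_take this)
    exact h this

theorem pv_drop_shift (line rest : List Char) (m : Nat) :
    (line ++ '\n'::rest).drop (line.length + 1 + m) = rest.drop m := by
  rw [List.drop_append]
  rw [List.drop_eq_nil_of_le (by omega)]
  have : line.length + 1 + m - line.length = m + 1 := by omega
  rw [this, List.drop_succ_cons, List.nil_append]

theorem pv_find_append_found {line rest : List Char}
    (hf : 0 ≤ PySem.Chars.find line pvMarker) :
    PySem.Chars.find (line ++ '\n'::rest) pvMarker = PySem.Chars.find line pvMarker := by
  obtain ⟨hp, hmin⟩ := PySem.Chars.find_spec hf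
  have hle : (PySem.Chars.find line pvMarker).toNat ≤ line.length := by
    have := PySem.Chars.find_le_length line pvMarker; omega
  have heq : PySem.Chars.find (line ++ '\n'::rest) pvMarker
      = ((PySem.Chars.find line pvMarker).toNat : Int) := by
    apply pv_find_eq_of
    · rw [List.drop_append_of_le_length hle]
      exact hp.trans (List.prefix_append _ _)
    · intro i hlt hpre
      exact hmin i hlt (pv_no_straddle (by omega) hpre).2
  omega
theorem pv_find_append_miss_none {line rest : List Char}
    (hf : PySem.Chars.find line pvMarker = -1)
    (hr : PySem.Chars.find rest pvMarker = -1) :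
    PySem.Chars.find (line ++ '\n'::rest) pvMarker = -1 := by
  rw [PySem.Chars.find_eq_neg_one_iff] at hf hr ⊢
  intro hinf
  obtain ⟨j, hj⟩ := (PySem.Chars.exists_prefix_drop_iff_isIn _ _).2
    ((PySem.Chars.isIn_iff_infix _ _).2 hinf)
  by_cases hcase : j ≤ line.length
  · exact hf ((PySem.Chars.isIn_iff_infix _ _).1
      ((PySem.Chars.exists_prefix_drop_iff_isIn _ _).1 ⟨j, (pv_no_straddle hcase hj).2⟩))
  · have hj' : pvMarker <+: rest.drop (j - line.length - 1) := by
      rwa [show j = line.length + 1 + (j - line.length - 1) by omega, pv_drop_shift] at hj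
    exact hr ((PySem.Chars.isIn_iff_infix _ _).1
      ((PySem.Chars.exists_prefix_drop_iff_isIn _ _).1 ⟨_, hj'⟩))
theorem pv_find_append_miss_some {line rest : List Char}
    (hf : PySem.Chars.find line pvMarker = -1)
    (hr : 0 ≤ PySem.Chars.find rest pvMarker) :
    PySem.Chars.find (line ++ '\n'::rest) pvMarker
      = ((line.length : Int) + 1) + PySem.Chars.find rest pvMarker := by
  obtain ⟨hp, hmin⟩ := PySem.Chars.find_spec hr
  have heq : PySem.Chars.find (line ++ '\n'::rest) pvMarker
      = ((line.length + 1 + (PySem.Chars.find rest pvMarker).toNat : Nat) : Int) := by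
    apply pv_find_eq_of
    · rwa [pv_drop_shift]
    · intro i hlt hpre
      by_cases hcase : i ≤ line.length
      · rw [PySem.Chars.find_eq_neg_one_iff] at hf
        exact hf ((PySem.Chars.isIn_iff_infix _ _).1
          ((PySem.Chars.exists_prefix_drop_iff_isIn _ _).1 ⟨i, (pv_no_straddle hcase hpre).2⟩))
      · have hp' : pvMarker <+: rest.drop (i - line.length - 1) := by
          rwa [show i = line.length + 1 + (i - line.length - 1) by omega, pv_drop_shift] at hpre
        exact hmin _ (by omega) hp'
  omega

theorem pvLoopA_succ (cs : List Char) (f k : Nat) (hk : k ≤ cs.length)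
    (acc : PySem.Set String) :
    pvLoopA cs (f+1) (k : Int) acc =
      if PySem.Chars.find (cs.drop k) pvMarker < 0 then acc
      else
        let startN := k + (PySem.Chars.find (cs.drop k) pvMarker).toNat + pvMarker.length
        if PySem.Chars.find (cs.drop startN) ['\n'] < 0 then acc
        else
          let e2 := (PySem.Chars.find (cs.drop startN) ['\n']).toNat
          let name := (PySem.Chars.split₀
            (PySem.Chars.strip ((cs.drop startN).take e2))).headD []
          pvLoopA cs f ((startN + e2 + 1 : Nat) : Int)
            (if name ≠ [] then PySem.Set.add acc (String.ofList name) else acc) := by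
  have hff := PySem.Chars.findFrom_natCast cs pvMarker k hk
  set e := PySem.Chars.find (cs.drop k) pvMarker with he
  have hne1 : -1 ≤ e := PySem.Chars.neg_one_le_find (cs.drop k) pvMarker
  simp only [pvLoopA]
  rw [hff]
  by_cases h1 : e = -1
  · simp [h1]
  · have h1' : 0 ≤ e := by omega
    rw [if_neg h1, if_neg (show ¬((k : Int) + e < 0) by omega),
        if_neg (show ¬(e < 0) by omega)]
    have hpm : pvMarker <+: (cs.drop k).drop e.toNat := (PySem.Chars.find_spec h1').1
    have hsN : k + e.toNat + pvMarker.length ≤ cs.length := by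
      have hml : pvMarker.length = 19 := by decide
      have h := hpm.length_le
      rw [List.drop_drop, List.length_drop] at h
      omega
    rw [show (k : Int) + e + (pvMarker.length : Int)
        = ((k + e.toNat + pvMarker.length : Nat) : Int) by push_cast; omega]
    have hff2 := PySem.Chars.findFrom_natCast cs ['\n'] (k + e.toNat + pvMarker.length) hsN
    rw [hff2]
    set e2 := PySem.Chars.find (cs.drop (k + e.toNat + pvMarker.length)) ['\n'] with he2
    have hne2 : -1 ≤ e2 := PySem.Chars.neg_one_le_find _ _
    by_cases h2 : e2 = -1
    · simp [h2]
    · have h2' : 0 ≤ e2 := by omega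
      rw [if_neg h2, if_neg (show ¬(((k + e.toNat + pvMarker.length : Nat) : Int) + e2 < 0) by omega),
          if_neg (show ¬(e2 < 0) by omega)]
      rw [show ((k + e.toNat + pvMarker.length : Nat) : Int) + e2
          = ((k + e.toNat + pvMarker.length + e2.toNat : Nat) : Int) by push_cast; omega]
      have hslice : PySem.Chars.slice cs (some ((k + e.toNat + pvMarker.length : Nat) : Int))
          (some ((k + e.toNat + pvMarker.length + e2.toNat : Nat) : Int))
          = (cs.drop (k + e.toNat + pvMarker.length)).take e2.toNat := by
        rw [PySem.Chars.slice_eq_listSlice,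
            PySem.List.slice_toNat cs (by omega) (by omega)]
        congr 1; omega
      rw [hslice]
      rw [show ((k + e.toNat + pvMarker.length + e2.toNat : Nat) : Int) + 1
          = ((k + e.toNat + pvMarker.length + e2.toNat + 1 : Nat) : Int) by push_cast; omega]

theorem pv_go_nil (fuel : Nat) (cur : List Char) (acc : List (List Char)) :
    PySem.Chars.splitOn.go ['\n'] fuel [] cur acc = (cur.reverse :: acc).reverse := by
  cases fuel <;> simp [PySem.Chars.splitOn.go]

theorem pv_go_nl (fuel : Nat) (v cur : List Char) (acc : List (List Char)) :
    PySem.Chars.splitOn.go ['\n'] (fuel+1) ('\n'::v) cur acc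
      = PySem.Chars.splitOn.go ['\n'] fuel v [] (cur.reverse :: acc) := by
  simp [PySem.Chars.splitOn.go, List.isPrefixOf]

theorem pv_go_cons (fuel : Nat) {c : Char} (hc : c ≠ '\n') (v cur : List Char) (acc : List (List Char)) :
    PySem.Chars.splitOn.go ['\n'] (fuel+1) (c::v) cur acc
      = PySem.Chars.splitOn.go ['\n'] fuel v (c::cur) acc := by
  simp [PySem.Chars.splitOn.go, List.isPrefixOf]
  intro h; exact absurd h.symm hc

theorem pv_go_acc : ∀ (fuel : Nat) (l cur : List Char) (acc : List (List Char)),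
    PySem.Chars.splitOn.go ['\n'] fuel l cur acc
      = acc.reverse ++ PySem.Chars.splitOn.go ['\n'] fuel l cur [] := by
  intro fuel
  induction fuel with
  | zero => intro l cur acc; simp [PySem.Chars.splitOn.go]
  | succ fuel ih =>
    intro l cur acc
    match l with
    | [] => simp [pv_go_nil]
    | c :: v =>
      by_cases hc : c = '\n'
      · subst hc
        rw [pv_go_nl, pv_go_nl, ih v [] (cur.reverse :: acc), ih v [] [cur.reverse]]
        simp
      · rw [pv_go_cons fuel hc, pv_go_cons fuel hc, ih v (c::cur) acc]

theorem pv_go_line : ∀ (u : List Char), '\n' ∉ u →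
    ∀ (fuel : Nat) (l' cur : List Char) (acc : List (List Char)),
    PySem.Chars.splitOn.go ['\n'] (fuel + u.length) (u ++ l') cur acc
      = PySem.Chars.splitOn.go ['\n'] fuel l' (u.reverse ++ cur) acc := by
  intro u
  induction u with
  | nil => intro _ fuel l' cur acc; simp
  | cons c u ih =>
    intro hnl fuel l' cur acc
    have hc : c ≠ '\n' := fun h => hnl (h ▸ List.mem_cons_self)
    have hrec : fuel + (c::u).length = (fuel + u.length) + 1 := by simp; omega
    rw [hrec, List.cons_append, pv_go_cons (fuel + u.length) hc,
        ih (fun h => hnl (List.mem_cons_of_mem _ h)) fuel l' (c::cur) acc]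
    simp

theorem pv_splitOn_no_nl {cs : List Char} (h : '\n' ∉ cs) :
    PySem.Chars.splitOn cs ['\n'] = [cs] := by
  unfold PySem.Chars.splitOn
  calc PySem.Chars.splitOn.go ['\n'] (cs.length + 1) cs [] []
      = PySem.Chars.splitOn.go ['\n'] (1 + cs.length) (cs ++ []) [] [] := by
        rw [List.append_nil]; congr 1; omega
    _ = PySem.Chars.splitOn.go ['\n'] 1 [] (cs.reverse ++ []) [] := pv_go_line cs h 1 [] [] []
    _ = [cs] := by rw [pv_go_nil]; simp

theorem pv_splitOn_cons {line rest : List Char} (h : '\n' ∉ line) :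
    PySem.Chars.splitOn (line ++ '\n'::rest) ['\n'] = line :: PySem.Chars.splitOn rest ['\n'] := by
  unfold PySem.Chars.splitOn
  have h1 : (line ++ '\n'::rest).length + 1 = (rest.length + 2) + line.length := by
    simp; omega
  rw [h1, pv_go_line line h (rest.length + 2) ('\n'::rest) [] [], pv_go_nl, pv_go_acc]
  simp

theorem pv_decomp (cs : List Char) :
    ('\n' ∉ cs) ∨ ∃ line rest, cs = line ++ '\n'::rest ∧ '\n' ∉ line := by
  induction cs with
  | nil => left; simp
  | cons c cs ih =>
    by_cases hc : c = '\n'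
    · right; exact ⟨[], cs, by simp [hc], by simp⟩
    · rcases ih with h | ⟨line, rest, rfl, hline⟩
      · left; simp [h]; exact fun e => hc e.symm
      · right
        exact ⟨c :: line, rest, by simp, by simp [hline]; exact fun e => hc e.symm⟩

theorem pv_splitOn_ne_nil (cs : List Char) : PySem.Chars.splitOn cs ['\n'] ≠ [] := by
  rcases pv_decomp cs with h | ⟨line, rest, rfl, hline⟩
  · rw [pv_splitOn_no_nl h]; simp
  · rw [pv_splitOn_cons hline]; simp

-- the newline found after a marker occurrence lies strictly inside the string
theorem pv_nl_bound {s : List Char} {startN : Nat}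
    (h2 : 0 ≤ PySem.Chars.find (s.drop startN) ['\n']) :
    startN + (PySem.Chars.find (s.drop startN) ['\n']).toNat + 1 ≤ s.length := by
  have hp := (PySem.Chars.find_spec h2).1
  have := hp.length_le
  simp [List.drop_drop] at this
  omega

theorem pvLoopA_shift (line rest : List Char) :
    ∀ (f k : Nat) (acc : PySem.Set String), k ≤ rest.length →
    pvLoopA (line ++ '\n'::rest) f ((line.length + 1 + k : Nat) : Int) acc
      = pvLoopA rest f (k : Int) acc := by
  intro f
  induction f with
  | zero => intro k acc _; rfl
  | succ f ih =>
    intro k acc hk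
    have hlen : (line ++ '\n'::rest).length = line.length + 1 + rest.length := by
      simp; omega
    rw [pvLoopA_succ _ f (line.length + 1 + k) (by omega) acc,
        pvLoopA_succ rest f k hk acc]
    rw [pv_drop_shift line rest k]
    by_cases h1 : PySem.Chars.find (rest.drop k) pvMarker < 0
    · rw [if_pos h1, if_pos h1]
    · rw [if_neg h1, if_neg h1]
      dsimp only
      have h1' : 0 ≤ PySem.Chars.find (rest.drop k) pvMarker := by omega
      set e := PySem.Chars.find (rest.drop k) pvMarker with he
      rw [show line.length + 1 + k + e.toNat + pvMarker.length
          = line.length + 1 + (k + e.toNat + pvMarker.length) by omega]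
      rw [pv_drop_shift line rest (k + e.toNat + pvMarker.length)]
      by_cases h2 : PySem.Chars.find (rest.drop (k + e.toNat + pvMarker.length)) ['\n'] < 0
      · rw [if_pos h2, if_pos h2]
      · rw [if_neg h2, if_neg h2]
        have h2' : 0 ≤ PySem.Chars.find (rest.drop (k + e.toNat + pvMarker.length)) ['\n'] := by omega
        set e2 := (PySem.Chars.find (rest.drop (k + e.toNat + pvMarker.length)) ['\n']).toNat with he2
        rw [show line.length + 1 + (k + e.toNat + pvMarker.length) + e2 + 1
            = line.length + 1 + (k + e.toNat + pvMarker.length + e2 + 1) by omega]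
        exact ih (k + e.toNat + pvMarker.length + e2 + 1) _ (by have := pv_nl_bound h2'; omega)

theorem pvLoopA_fuel (cs : List Char) :
    ∀ (f1 f2 k : Nat) (acc : PySem.Set String), k ≤ cs.length →
    cs.length < k + f1 → cs.length < k + f2 →
    pvLoopA cs f1 (k : Int) acc = pvLoopA cs f2 (k : Int) acc := by
  intro f1
  induction f1 with
  | zero => intro f2 k acc hk h1 h2; omega
  | succ f ih =>
    intro f2 k acc hk hb1 hb2
    match f2, hb2 with
    | 0, hb2 => omega
    | f2+1, hb2 =>
      rw [pvLoopA_succ cs f k hk acc, pvLoopA_succ cs f2 k hk acc]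
      by_cases h1 : PySem.Chars.find (cs.drop k) pvMarker < 0
      · rw [if_pos h1, if_pos h1]
      · rw [if_neg h1, if_neg h1]
        dsimp only
        by_cases h2 : PySem.Chars.find
            (cs.drop (k + (PySem.Chars.find (cs.drop k) pvMarker).toNat + pvMarker.length)) ['\n'] < 0
        · rw [if_pos h2, if_pos h2]
        · rw [if_neg h2, if_neg h2]
          have h2' : 0 ≤ PySem.Chars.find
              (cs.drop (k + (PySem.Chars.find (cs.drop k) pvMarker).toNat + pvMarker.length)) ['\n'] := by omega
          have hb := pv_nl_bound h2'
          exact ih f2 _ _ (by omega) (by omega) (by omega)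

theorem pvLoopA_skip (line rest : List Char) (_hnl : '\n' ∉ line)
    (hf : PySem.Chars.find line pvMarker = -1) :
    ∀ (f : Nat) (acc : PySem.Set String),
    pvLoopA (line ++ '\n'::rest) f 0 acc = pvLoopA rest f 0 acc := by
  intro f acc
  match f with
  | 0 => rfl
  | f+1 =>
    have hlen : (line ++ '\n'::rest).length = line.length + 1 + rest.length := by
      simp; omega
    have h0 : ((0:Nat) : Int) = (0 : Int) := rfl
    rw [← h0, pvLoopA_succ _ f 0 (by omega) acc, pvLoopA_succ rest f 0 (by omega) acc]
    simp only [List.drop_zero]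
    by_cases hr : PySem.Chars.find rest pvMarker < 0
    · have hr' : PySem.Chars.find rest pvMarker = -1 := by
        have := PySem.Chars.neg_one_le_find rest pvMarker; omega
      rw [pv_find_append_miss_none hf hr']
      rw [if_pos (by omega), if_pos hr]
    · have hr' : 0 ≤ PySem.Chars.find rest pvMarker := by omega
      rw [pv_find_append_miss_some hf hr']
      rw [if_neg (by omega), if_neg hr]
      set er := PySem.Chars.find rest pvMarker with her
      rw [show 0 + (((line.length:Int) + 1) + er).toNat + pvMarker.length
          = line.length + 1 + (0 + er.toNat + pvMarker.length) by omega]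
      rw [pv_drop_shift line rest (0 + er.toNat + pvMarker.length)]
      by_cases h2 : PySem.Chars.find (rest.drop (0 + er.toNat + pvMarker.length)) ['\n'] < 0
      · rw [if_pos h2, if_pos h2]
      · rw [if_neg h2, if_neg h2]
        have h2' : 0 ≤ PySem.Chars.find (rest.drop (0 + er.toNat + pvMarker.length)) ['\n'] := by omega
        set e2 := (PySem.Chars.find (rest.drop (0 + er.toNat + pvMarker.length)) ['\n']).toNat with he2
        rw [show line.length + 1 + (0 + er.toNat + pvMarker.length) + e2 + 1
            = line.length + 1 + (0 + er.toNat + pvMarker.length + e2 + 1) by omega]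
        exact pvLoopA_shift line rest f _ _ (by have := pv_nl_bound h2'; omega)

theorem pvLoopA_head (line rest : List Char) (hnl : '\n' ∉ line)
    (hf : 0 ≤ PySem.Chars.find line pvMarker) (f : Nat) (acc : PySem.Set String) :
    pvLoopA (line ++ '\n'::rest) (f+1) 0 acc = pvLoopA rest f 0 (pvStepB acc line) := by
  have hlen : (line ++ '\n'::rest).length = line.length + 1 + rest.length := by
    simp; omega
  have h0 : ((0:Nat) : Int) = (0 : Int) := rfl
  rw [← h0, pvLoopA_succ _ f 0 (by omega) acc]
  simp only [List.drop_zero]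
  rw [pv_find_append_found hf, if_neg (by omega)]
  set e := PySem.Chars.find line pvMarker with he
  have hpm : pvMarker <+: line.drop e.toNat := (PySem.Chars.find_spec hf).1
  have hsL : 0 + e.toNat + pvMarker.length ≤ line.length := by
    have := hpm.length_le
    rw [List.length_drop] at this
    have hml : pvMarker.length = 19 := by decide
    omega
  rw [List.drop_append_of_le_length hsL]
  have hnl2 : '\n' ∉ line.drop (0 + e.toNat + pvMarker.length) :=
    fun hm => hnl (List.mem_of_mem_drop hm)
  rw [pv_find_nl hnl2]
  rw [if_neg (by omega)]
  have htoNat : ((((line.drop (0 + e.toNat + pvMarker.length)).length : Nat) : Int)).toNat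
      = (line.drop (0 + e.toNat + pvMarker.length)).length := by omega
  rw [htoNat]
  rw [List.take_left' rfl]
  -- recursion offset is exactly line.length + 1
  rw [show 0 + e.toNat + pvMarker.length + (line.drop (0 + e.toNat + pvMarker.length)).length + 1
      = line.length + 1 + 0 by rw [List.length_drop]; omega]
  rw [pvLoopA_shift line rest f 0 _ (by omega)]
  -- now both sides are pvLoopA rest f 0 applied to the two accumulators
  unfold pvStepB
  rw [if_pos hf]
  rw [PySem.Chars.slice_eq_listSlice, PySem.List.slice_from line (by omega)]
  rw [← he]
  rw [show (e + (pvMarker.length : Int)).toNat = 0 + e.toNat + pvMarker.length by omega]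

theorem pv_main_nonl {cs : List Char} (h : '\n' ∉ cs) (f : Nat) (acc : PySem.Set String) :
    pvLoopA cs (f+1) 0 acc = acc := by
  have h0 : ((0:Nat) : Int) = (0 : Int) := rfl
  rw [← h0, pvLoopA_succ cs f 0 (Nat.zero_le _) acc]
  simp only [List.drop_zero]
  by_cases h1 : PySem.Chars.find cs pvMarker < 0
  · rw [if_pos h1]
  · rw [if_neg h1]
    have h2 : PySem.Chars.find
        (cs.drop (0 + (PySem.Chars.find cs pvMarker).toNat + pvMarker.length)) ['\n'] = -1 := by
      rw [PySem.Chars.find_eq_neg_one_iff]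
      intro hinf
      exact h (List.mem_of_mem_drop ((List.singleton_sublist).1 hinf.sublist))
    rw [h2, if_pos (by omega)]

theorem pv_main : ∀ (n : Nat) (cs : List Char) (acc : PySem.Set String), cs.length ≤ n →
    pvLoopA cs (cs.length + 1) 0 acc
      = ((PySem.Chars.splitOn cs ['\n']).dropLast).foldl pvStepB acc := by
  intro n
  induction n with
  | zero =>
    intro cs acc hle
    have hcs : cs = [] := List.eq_nil_of_length_eq_zero (by omega)
    subst hcs
    rw [show ([]:List Char).length + 1 = 0 + 1 from rfl,
        pv_main_nonl (by simp) 0 acc, pv_splitOn_no_nl (by simp)]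
    rfl
  | succ n ih =>
    intro cs acc hle
    have h0 : ((0:Nat) : Int) = (0 : Int) := rfl
    rcases pv_decomp cs with h | ⟨line, rest, rfl, hline⟩
    · rw [pv_main_nonl h cs.length acc, pv_splitOn_no_nl h]
      rfl
    · have hlen : (line ++ '\n'::rest).length = line.length + 1 + rest.length := by
        simp; omega
      rw [pv_splitOn_cons hline,
          List.dropLast_cons_of_ne_nil (pv_splitOn_ne_nil rest), List.foldl_cons]
      have hrle : rest.length ≤ n := by omega
      by_cases hf : 0 ≤ PySem.Chars.find line pvMarker
      · rw [show (line ++ '\n'::rest).length + 1 = (line.length + 1 + rest.length) + 1 by omega,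
            pvLoopA_head line rest hline hf (line.length + 1 + rest.length) acc]
        have hfe := pvLoopA_fuel rest (line.length + 1 + rest.length) (rest.length + 1) 0
          (pvStepB acc line) (Nat.zero_le _) (by omega) (by omega)
        rw [h0] at hfe
        rw [hfe]
        exact ih rest (pvStepB acc line) hrle
      · have hf' : PySem.Chars.find line pvMarker = -1 := by
          have := PySem.Chars.neg_one_le_find line pvMarker; omega
        rw [pvLoopA_skip line rest hline hf' ((line ++ '\n'::rest).length + 1) acc]
        have hfe := pvLoopA_fuel rest ((line ++ '\n'::rest).length + 1) (rest.length + 1) 0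
          acc (Nat.zero_le _) (by omega) (by omega)
        rw [h0] at hfe
        rw [hfe, ih rest acc hrle]
        have hstep : pvStepB acc line = acc := by
          unfold pvStepB
          rw [if_neg (by omega)]
        rw [hstep]

-- ===== VERDICT (by name: the statement is the Claim_ definition above) =====
theorem collect_test_names_py_spec : Claim_equal_collect_test_names_py := by
  intro text _ _
  unfold Spec_collect_test_names_py collect_test_names_py collect_test_names_py_alt
  exact pv_main text.toList.length text.toList PySem.Set.empty le_rfl
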